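-- pv_equiv track=rewrite | github.com/MrBrantCode/unitest_baseline | mut_generate/mist_train_taco/taco_4692/solution.py | find_min_moves_for_black_square
-- ===== SOURCE A (Python) =====
-- def find_min_moves_for_black_square(n, m, moves):
--     """
--     Finds the minimum number of moves required to form a black square with side 3 on a n x n checkered piece of paper.
--
--     Parameters:
--     n (int): The size of the squared piece of paper.
--     m (int): The number of moves.
--     moves (list of tuples): A list of moves where each move is a tuple (xi, yi) representing the row and column of the painted cell.
--
--     Returns:
--     int: The minimum number of moves after which a black square with side 3 is formed, or -1 if no such move exists.
--     """
--     # Initialize a 2D list to keep track of the number of moves in each cell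
--     moves_count = [[0] * (n + 4) for _ in range(n + 4)]
--
--     # Process each move
--     for i, (x, y) in enumerate(moves):
--         # Update the moves_count for the 3x3 square centered at (x, y)
--         for a in range(x, x + 3):
--             for b in range(y, y + 3):
--                 moves_count[a][b] += 1
--                 # Check if the current cell has been painted 9 times
--                 if moves_count[a][b] == 9:
--                     return i + 1
--
--     # If no 3x3 black square is formed after all moves, return -1
--     return -1
-- ===== SOURCE B (Python) =====
-- def find_min_moves_for_black_square(n, m, moves):
--     # A 3x3 square is black once all nine of its cells have been painted:
--     # track the set of painted cells and, after each move, test the (at most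
--     # nine) 3x3 squares that contain the cell just painted.
--     painted = set()
--     for i, (x, y) in enumerate(moves, 1):
--         painted.add((x, y))
--         for cx in range(x - 2, x + 1):
--             for cy in range(y - 2, y + 1):
--                 if all((cx + dx, cy + dy) in painted
--                        for dx in range(3) for dy in range(3)):
--                     return i
--     return -1
-- ===== Notes on version B (the rewrite author's own statement) =====
-- stated objective: simpler
-- what changed: Replaces A's (n+4)x(n+4) grid of per-cell paint counters (a square declared black when a counter reaches 9) with a set of painted cells and an all-nine-cells-present test on the at most nine 3x3 squares containing each newly painted cell; Pre_ additionally excludes 9-or-more-move lists with a coordinate outside [0, n+1], where A raises IndexError or silently wraps to the opposite side of its padded grid.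
-- intended difference: On move lists where some 3x3 square receives its ninth paint operation counting repainted cells with multiplicity before any square has all nine distinct cells painted, A returns the index of that ninth paint although the square is not yet fully black, while B returns the index of the move that actually completes a square (or -1); B's is the intended value because repainting an already-black cell blackens nothing new. — e.g. on find_min_moves_for_black_square(0, 9, [(0, 0), (0, 0), (0, 0), (0, 0), (0, 0), (0, 0), (0, 0), (0, 0), (0, 0)]): A returns 9, B returns -1
import Mathlib
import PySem

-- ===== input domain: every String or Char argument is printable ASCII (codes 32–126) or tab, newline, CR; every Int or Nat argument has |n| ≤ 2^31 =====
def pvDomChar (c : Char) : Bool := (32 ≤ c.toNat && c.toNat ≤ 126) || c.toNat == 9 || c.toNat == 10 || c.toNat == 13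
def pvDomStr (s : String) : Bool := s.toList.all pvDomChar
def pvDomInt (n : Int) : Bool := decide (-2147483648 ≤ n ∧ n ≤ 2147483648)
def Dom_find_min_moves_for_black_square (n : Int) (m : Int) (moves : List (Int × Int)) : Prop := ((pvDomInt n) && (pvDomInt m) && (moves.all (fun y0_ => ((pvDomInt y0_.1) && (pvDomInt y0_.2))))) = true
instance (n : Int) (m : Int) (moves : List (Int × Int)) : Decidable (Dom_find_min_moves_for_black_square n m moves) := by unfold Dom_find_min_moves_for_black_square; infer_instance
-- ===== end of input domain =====

-- B replaces A's (n+4)x(n+4) grid of paint COUNTERS with a set of painted cells and an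
-- all-nine-cells-present test on the squares containing each new cell (objective: simpler);
-- on inputs where A declares a square black after nine paint operations that repaint cells,
-- B instead waits until a square is actually fully painted (see D_ below).

-- ===== PORT A =====
-- moves_count[a][b]  (Python list-of-lists read; exact for the in-range indices Pre_ admits)
def pvGridGet (g : List (List Int)) (a b : Int) : Int :=
  PySem.List.pyGetD (PySem.List.pyGetD g a []) b 0

-- moves_count[a][b] += 1
def pvGridInc (g : List (List Int)) (a b : Int) : List (List Int) :=
  PySem.List.pySetD g a
    (PySem.List.pySetD (PySem.List.pyGetD g a []) b (pvGridGet g a b + 1))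

-- the cell sequence of 'for a in range(x, x+3): for b in range(y, y+3):'
def pvFootprint (x y : Int) : List (Int × Int) :=
  (PySem.List.pyRange x (x + 3)).flatMap
    (fun a => (PySem.List.pyRange y (y + 3)).map (fun b => (a, b)))

-- the inner double loop: increment each cell, early-return r when a cell reaches 9
def pvPaintCells (g : List (List Int)) (cells : List (Int × Int)) (r : Int) :
    List (List Int) × Option Int :=
  match cells with
  | [] => (g, none)
  | c :: rest =>
    let g' := pvGridInc g c.1 c.2
    if pvGridGet g' c.1 c.2 == 9 then (g', some r) else pvPaintCells g' rest r

-- the 'for i, (x, y) in enumerate(moves)' loop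
def pvLoopA (g : List (List Int)) (moves : List (Int × Int)) (i : Int) : Int :=
  match moves with
  | [] => -1
  | c :: rest =>
    let p := pvPaintCells g (pvFootprint c.1 c.2) (i + 1)
    match p.2 with
    | some r => r
    | none => pvLoopA p.1 rest (i + 1)

def find_min_moves_for_black_square (n : Int) (m : Int) (moves : List (Int × Int)) : Int :=
  pvLoopA (List.replicate (n + 4).toNat (List.replicate (n + 4).toNat 0)) moves 0

-- ===== PORT B =====
-- painted = set(); for i,(x,y) in enumerate(moves,1): add, then test the squares containing (x,y)
def pvLoopB (painted : PySem.Set (Int × Int)) (moves : List (Int × Int)) (i : Int) : Int :=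
  match moves with
  | [] => -1
  | c :: rest =>
    let p := PySem.Set.add painted c
    if (PySem.List.pyRange (c.1 - 2) (c.1 + 1)).any (fun cx =>
        (PySem.List.pyRange (c.2 - 2) (c.2 + 1)).any (fun cy =>
          (PySem.List.pyRange 0 3).all (fun dx =>
            (PySem.List.pyRange 0 3).all (fun dy =>
              PySem.Set.contains p (cx + dx, cy + dy)))))
    then i
    else pvLoopB p rest (i + 1)

def find_min_moves_for_black_square_alt (n : Int) (m : Int) (moves : List (Int × Int)) : Int :=
  pvLoopB PySem.Set.empty moves 1

-- ===== PRECONDITION & SPEC =====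
-- Pre_ admits the task's natural domain (all coordinates in [0, n+1], the cells of A's padded grid)
-- and, in addition, any non-raising list of at most 8 moves (too few paint operations for any
-- square ever to be declared black, so both programs return -1).  It excludes lists of 9 or more
-- moves with a coordinate outside [0, n+1], where A either raises IndexError (coordinate above
-- n+1 or below -(n+4)) or silently reads the opposite side of its padded grid via
-- negative-index wraparound.
def Pre_find_min_moves_for_black_square (n : Int) (m : Int) (moves : List (Int × Int)) : Prop :=
  (∀ c ∈ moves, 0 ≤ c.1 ∧ c.1 ≤ n + 1 ∧ 0 ≤ c.2 ∧ c.2 ≤ n + 1) ∨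
  (moves.length ≤ 8 ∧ -1 ≤ n ∧
    ∀ c ∈ moves, -(n + 4) ≤ c.1 ∧ c.1 ≤ n + 1 ∧ -(n + 4) ≤ c.2 ∧ c.2 ≤ n + 1)
instance (n : Int) (m : Int) (moves : List (Int × Int)) : Decidable (Pre_find_min_moves_for_black_square n m moves) := by unfold Pre_find_min_moves_for_black_square; infer_instance

def pvWitness_find_min_moves_for_black_square : Int × Int × (List (Int × Int)) := (1, 2, [(0, 0), (1, 1)])

-- On move lists where some 3x3 square receives its ninth paint operation (counting repainted
-- cells with multiplicity) before any square has all nine distinct cells painted, A returns the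
-- index of that ninth paint although the square is not yet fully black, while B returns the index
-- of the move that first completes a square (or -1); B's is the intended value because repainting
-- an already-black cell blackens nothing new.
def D_find_min_moves_for_black_square (n : Int) (m : Int) (moves : List (Int × Int)) : Prop :=
  ∃ P ∈ moves.inits, ∃ p ∈ P, ∃ w ∈ pvFootprint (p.1 - 2) (p.2 - 2),
    9 ≤ P.countP (pvFootprint w.1 w.2).contains ∧
    ¬ (P.any fun p => (pvFootprint (p.1 - 2) (p.2 - 2)).any fun w =>
      (pvFootprint w.1 w.2).all P.contains)
instance (n : Int) (m : Int) (moves : List (Int × Int)) : Decidable (D_find_min_moves_for_black_square n m moves) := by unfold D_find_min_moves_for_black_square; infer_instance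

def Spec_find_min_moves_for_black_square (n : Int) (m : Int) (moves : List (Int × Int)) (out : Int) : Prop := ¬ D_find_min_moves_for_black_square n m moves → out = find_min_moves_for_black_square_alt n m moves
instance (n : Int) (m : Int) (moves : List (Int × Int)) (out : Int) : Decidable (Spec_find_min_moves_for_black_square n m moves out) := by unfold Spec_find_min_moves_for_black_square; infer_instance

def pvDiffWitness_find_min_moves_for_black_square : Int × Int × (List (Int × Int)) :=
  (0, 9, [(0, 0), (0, 0), (0, 0), (0, 0), (0, 0), (0, 0), (0, 0), (0, 0), (0, 0)])

def pvDiffWitnessOut_find_min_moves_for_black_square : Int × Int := (9, -1)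

-- ===== CLAIM (what is proved, stated in full; the proofs are below) =====
def Claim_unchanged_find_min_moves_for_black_square : Prop := ∀ (n : Int) (m : Int) (moves : List (Int × Int)), Dom_find_min_moves_for_black_square n m moves → Pre_find_min_moves_for_black_square n m moves → Spec_find_min_moves_for_black_square n m moves (find_min_moves_for_black_square n m moves)
def Claim_changed_find_min_moves_for_black_square : Prop := Dom_find_min_moves_for_black_square (pvDiffWitness_find_min_moves_for_black_square.1) (pvDiffWitness_find_min_moves_for_black_square.2.1) (pvDiffWitness_find_min_moves_for_black_square.2.2) ∧ Pre_find_min_moves_for_black_square (pvDiffWitness_find_min_moves_for_black_square.1) (pvDiffWitness_find_min_moves_for_black_square.2.1) (pvDiffWitness_find_min_moves_for_black_square.2.2) ∧ D_find_min_moves_for_black_square (pvDiffWitness_find_min_moves_for_black_square.1) (pvDiffWitness_find_min_moves_for_black_square.2.1) (pvDiffWitness_find_min_moves_for_black_square.2.2) ∧ find_min_moves_for_black_square (pvDiffWitness_find_min_moves_for_black_square.1) (pvDiffWitness_find_min_moves_for_black_square.2.1) (pvDiffWitness_find_min_moves_for_black_square.2.2) = pvDiffWitnessOut_find_min_moves_for_black_square.1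 ∧ find_min_moves_for_black_square_alt (pvDiffWitness_find_min_moves_for_black_square.1) (pvDiffWitness_find_min_moves_for_black_square.2.1) (pvDiffWitness_find_min_moves_for_black_square.2.2) = pvDiffWitnessOut_find_min_moves_for_black_square.2 ∧ pvDiffWitnessOut_find_min_moves_for_black_square.1 ≠ pvDiffWitnessOut_find_min_moves_for_black_square.2
def Claim_exact_find_min_moves_for_black_square : Prop := ∀ (n : Int) (m : Int) (moves : List (Int × Int)), Dom_find_min_moves_for_black_square n m moves → Pre_find_min_moves_for_black_square n m moves → D_find_min_moves_for_black_square n m moves → find_min_moves_for_black_square n m moves ≠ find_min_moves_for_black_square_alt n m moves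


-- ===== LEMMAS AND PROOFS =====

-- number of moves of ms lying in the 3x3 window whose bottom-right cell is (a, b)
def pvCnt (ms : List (Int × Int)) (a b : Int) : Int :=
  (ms.countP (fun p => decide (a - 2 ≤ p.1 ∧ p.1 ≤ a ∧ b - 2 ≤ p.2 ∧ p.2 ≤ b)) : Int)

-- A's loop, restated over the list of already-processed moves instead of the grid
def pvSpecA (ms moves : List (Int × Int)) (i : Int) : Int :=
  match moves with
  | [] => -1
  | c :: rest =>
    if (pvFootprint c.1 c.2).any (fun q => pvCnt ms q.1 q.2 + 1 == 9) then i + 1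
    else pvSpecA (ms ++ [c]) rest (i + 1)

-- cell p lies in the 3x3 square whose top-left corner is w
def pvInWin (w p : Int × Int) : Bool :=
  decide (w.1 ≤ p.1 ∧ p.1 ≤ w.1 + 2 ∧ w.2 ≤ p.2 ∧ p.2 ≤ w.2 + 2)

-- some 3x3 square has absorbed nine paint operations, counted with multiplicity
def pvAtrig (P : List (Int × Int)) : Bool :=
  P.any fun p => (pvFootprint (p.1 - 2) (p.2 - 2)).any fun w =>
    9 ≤ P.countP (pvFootprint w.1 w.2).contains

-- some 3x3 square has all nine of its cells painted
def pvBtrig (P : List (Int × Int)) : Bool :=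
  P.any fun p => (pvFootprint (p.1 - 2) (p.2 - 2)).any fun w =>
    (pvFootprint w.1 w.2).all P.contains

lemma pvD_iff (n m : Int) (moves : List (Int × Int)) :
    D_find_min_moves_for_black_square n m moves ↔
    ∃ k ∈ List.range (moves.length + 1),
      pvAtrig (moves.take k) = true ∧ pvBtrig (moves.take k) = false := by
  unfold D_find_min_moves_for_black_square
  have hconv : ∀ P : List (Int × Int),
      (∃ p ∈ P, ∃ w ∈ pvFootprint (p.1 - 2) (p.2 - 2),
        9 ≤ P.countP (pvFootprint w.1 w.2).contains) ↔ pvAtrig P = true := by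
    intro P
    unfold pvAtrig
    simp [List.any_eq_true]
  constructor
  · rintro ⟨P, hP, p, hp, w, hw, h1, h2⟩
    rw [List.mem_inits P moves] at hP
    have htake := List.prefix_iff_eq_take.mp hP
    refine ⟨P.length, List.mem_range.mpr (by have := hP.length_le; omega), ?_, ?_⟩
    · rw [← htake]
      exact (hconv P).mp ⟨p, hp, w, hw, h1⟩
    · rw [← htake]
      have h2' : ¬ (pvBtrig P = true) := h2
      simpa using h2'
  · rintro ⟨k, _, h1, h2⟩
    obtain ⟨p, hp, w, hw, h1'⟩ := (hconv (moves.take k)).mpr h1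
    refine ⟨moves.take k, (List.mem_inits _ _).mpr (List.take_prefix k moves), p, hp, w, hw, h1', ?_⟩
    show ¬ (pvBtrig (moves.take k) = true)
    simp [h2]

-- B's per-move test, restated over the list of already-processed moves
def pvStepB (ms : List (Int × Int)) (c : Int × Int) : Bool :=
  (pvFootprint (c.1 - 2) (c.2 - 2)).any (fun w => (pvFootprint w.1 w.2).all (fun q => decide (q ∈ ms ++ [c])))

-- B's loop, restated over the list of already-processed moves
def pvSpecB (ms moves : List (Int × Int)) (i : Int) : Int :=
  match moves with
  | [] => -1
  | c :: rest =>
    if pvStepB ms c then i + 1 else pvSpecB (ms ++ [c]) rest (i + 1)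

lemma pvRange3 (x : Int) : PySem.List.pyRange x (x + 3) = [x, x + 1, x + 2] := by
  rw [PySem.List.pyRange_one_cons (by omega), PySem.List.pyRange_one_cons (by omega),
      PySem.List.pyRange_one_cons (by omega)]
  simp [PySem.List.pyRange]
  omega

lemma pvFootprint_eq (x y : Int) : pvFootprint x y =
    [(x, y), (x, y + 1), (x, y + 2), (x + 1, y), (x + 1, y + 1), (x + 1, y + 2),
     (x + 2, y), (x + 2, y + 1), (x + 2, y + 2)] := by
  simp [pvFootprint, pvRange3]

lemma pvMem_footprint (x y a b : Int) :
    (a, b) ∈ pvFootprint x y ↔ (a - 2 ≤ x ∧ x ≤ a ∧ b - 2 ≤ y ∧ y ≤ b) := by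
  simp [pvFootprint_eq, Prod.mk.injEq]
  omega

lemma pvNodup_footprint (x y : Int) : (pvFootprint x y).Nodup := by
  simp [pvFootprint_eq, Prod.mk.injEq]

def pvPhys (L : Nat) (i : Int) : Nat := if 0 ≤ i then i.toNat else L - (-i).toNat

lemma pvIdx_eq (L : Nat) (i : Int) (h1 : -(L:Int) ≤ i) (h2 : i < L) :
    PySem.List.pyIdx? L i = some (pvPhys L i) := by
  unfold PySem.List.pyIdx? pvPhys
  split_ifs <;> simp <;> omega

lemma pvPhys_lt (L : Nat) (i : Int) (h1 : -(L:Int) ≤ i) (h2 : i < L) (h3 : 0 < L) :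
    pvPhys L i < L := by
  unfold pvPhys
  split_ifs <;> omega

lemma pvGetD_in {α : Type} (xs : List α) (d : α) (i : Int)
    (h1 : -(xs.length:Int) ≤ i) (h2 : i < xs.length) (h3 : 0 < xs.length) :
    PySem.List.pyGetD xs i d = xs[pvPhys xs.length i]'(pvPhys_lt _ _ h1 h2 h3) := by
  simp [PySem.List.pyGetD, PySem.List.pyGet?, pvIdx_eq _ _ h1 h2,
    List.getElem?_eq_getElem (pvPhys_lt _ _ h1 h2 h3)]

lemma pvSetD_in {α : Type} (xs : List α) (v : α) (i : Int)
    (h1 : -(xs.length:Int) ≤ i) (h2 : i < xs.length) :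
    PySem.List.pySetD xs i v = xs.set (pvPhys xs.length i) v := by
  simp [PySem.List.pySetD, PySem.List.pySet?, pvIdx_eq _ _ h1 h2]

lemma pvPhys_ne (L : Nat) (hL : 3 ≤ L) {u u' : Int}
    (h1 : -(L:Int) ≤ u) (h2 : u < L) (h3 : -(L:Int) ≤ u') (h4 : u' < L)
    (hne : u ≠ u') (hc1 : u - u' ≤ 2) (hc2 : u' - u ≤ 2) :
    pvPhys L u ≠ pvPhys L u' := by
  unfold pvPhys
  split_ifs <;> omega

lemma pvGridGet_inc2 (g : List (List Int)) (L : Nat) (hL : 0 < L) (hg : g.length = L)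
    (hrows : ∀ row ∈ g, row.length = L) {a b a' b' : Int}
    (ha : -(L:Int) ≤ a) (ha' : a < (L : Int)) (hb : -(L:Int) ≤ b) (hb' : b < (L : Int))
    (hc : -(L:Int) ≤ a') (hc' : a' < (L : Int)) (hd : -(L:Int) ≤ b') (hd' : b' < (L : Int)) :
    pvGridGet (pvGridInc g a b) a' b' = pvGridGet g a' b'
      + (if pvPhys L a' = pvPhys L a ∧ pvPhys L b' = pvPhys L b then 1 else 0) := by
  subst hg
  have hpa : pvPhys g.length a < g.length := pvPhys_lt _ a ha ha' hL
  have hpa' : pvPhys g.length a' < g.length := pvPhys_lt _ a' hc hc' hL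
  have hpb' : pvPhys g.length b' < g.length := pvPhys_lt _ b' hd hd' hL
  have hrow : PySem.List.pyGetD g a [] = g[pvPhys g.length a] :=
    pvGetD_in g [] a ha ha' hL
  have hrow' : PySem.List.pyGetD g a' [] = g[pvPhys g.length a'] :=
    pvGetD_in g [] a' hc hc' hL
  have hrl : g[pvPhys g.length a].length = g.length := hrows _ (List.getElem_mem hpa)
  have hrl' : g[pvPhys g.length a'].length = g.length := hrows _ (List.getElem_mem hpa')
  have hset : pvGridInc g a b =
      g.set (pvPhys g.length a) (g[pvPhys g.length a].set (pvPhys g.length b) (pvGridGet g a b + 1)) := by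
    rw [pvGridInc, hrow, pvSetD_in _ _ _ (by omega) (by omega),
        pvSetD_in _ _ _ (by rw [hrl]; omega) (by rw [hrl]; omega)]
    have : pvPhys g[pvPhys g.length a].length b = pvPhys g.length b := by rw [hrl]
    simp only [this]
  have hget' : pvGridGet g a' b' = g[pvPhys g.length a'][pvPhys g.length b']'(by omega) := by
    rw [pvGridGet, hrow', pvGetD_in _ 0 b' (by rw [hrl']; omega) (by rw [hrl']; omega) (by omega)]
    have : pvPhys g[pvPhys g.length a'].length b' = pvPhys g.length b' := by rw [hrl']
    simp only [this]
  have hsl : (g.set (pvPhys g.length a)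
      (g[pvPhys g.length a].set (pvPhys g.length b) (pvGridGet g a b + 1))).length = g.length := by
    simp
  have houter : PySem.List.pyGetD
      (g.set (pvPhys g.length a) (g[pvPhys g.length a].set (pvPhys g.length b) (pvGridGet g a b + 1))) a' [] =
      if pvPhys g.length a = pvPhys g.length a'
      then g[pvPhys g.length a].set (pvPhys g.length b) (pvGridGet g a b + 1)
      else g[pvPhys g.length a'] := by
    rw [pvGetD_in _ [] a' (by rw [hsl]; omega) (by rw [hsl]; omega) (by rw [hsl]; omega)]
    have : pvPhys (g.set (pvPhys g.length a)
        (g[pvPhys g.length a].set (pvPhys g.length b) (pvGridGet g a b + 1))).length a'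
        = pvPhys g.length a' := by rw [hsl]
    simp only [this]
    exact List.getElem_set _
  have hgetab : pvGridGet g a b = g[pvPhys g.length a][pvPhys g.length b]'(by rw [hrl]; exact pvPhys_lt _ b hb hb' hL) := by
    rw [pvGridGet, hrow, pvGetD_in _ 0 b (by rw [hrl]; omega) (by rw [hrl]; omega) (by rw [hrl]; omega)]
    have : pvPhys g[pvPhys g.length a].length b = pvPhys g.length b := by rw [hrl]
    simp only [this]
  rw [hset, pvGridGet, houter]
  by_cases haa : pvPhys g.length a = pvPhys g.length a'
  · rw [if_pos haa]
    have h1 : (g[pvPhys g.length a].set (pvPhys g.length b) (pvGridGet g a b + 1)).length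
        = g.length := by rw [List.length_set, hrl]
    rw [pvGetD_in _ 0 b' (by rw [h1]; omega) (by rw [h1]; omega) (by rw [h1]; omega)]
    have h2 : pvPhys (g[pvPhys g.length a].set (pvPhys g.length b) (pvGridGet g a b + 1)).length b'
        = pvPhys g.length b' := by rw [h1]
    simp only [h2]
    rw [List.getElem_set]
    by_cases hbb : pvPhys g.length b = pvPhys g.length b'
    · rw [if_pos hbb, if_pos ⟨haa.symm, hbb.symm⟩]
      have h3 := hgetab
      simp only [haa, hbb] at h3
      rw [hget', h3]
    · rw [if_neg hbb, if_neg (fun h => hbb h.2.symm), add_zero, hget']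
      have h4 : g[pvPhys g.length a] = g[pvPhys g.length a'] := by simp only [haa]
      simp only [h4]
  · rw [if_neg haa, if_neg (fun h => haa h.1.symm), add_zero, hget',
        pvGetD_in _ 0 b' (by rw [hrl']; omega) (by rw [hrl']; omega) (by rw [hrl']; omega)]
    have : pvPhys g[pvPhys g.length a'].length b' = pvPhys g.length b' := by rw [hrl']
    simp only [this]

lemma pvGridGet_phys (g : List (List Int)) (hL : 0 < g.length)
    (hrows : ∀ row ∈ g, row.length = g.length) {a b : Int}
    (ha : -(g.length:Int) ≤ a) (ha' : a < (g.length : Int))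
    (hb : -(g.length:Int) ≤ b) (hb' : b < (g.length : Int)) :
    pvGridGet g a b = (g[pvPhys g.length a]'(pvPhys_lt _ a ha ha' hL))[pvPhys g.length b]'(by
      rw [hrows _ (List.getElem_mem (pvPhys_lt _ a ha ha' hL))]; exact pvPhys_lt _ b hb hb' hL) := by
  have hrl : (g[pvPhys g.length a]'(pvPhys_lt _ a ha ha' hL)).length = g.length :=
    hrows _ (List.getElem_mem (pvPhys_lt _ a ha ha' hL))
  rw [pvGridGet, pvGetD_in g [] a ha ha' hL,
      pvGetD_in _ 0 b (by rw [hrl]; omega) (by rw [hrl]; omega) (by rw [hrl]; omega)]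
  have : pvPhys (g[pvPhys g.length a]'(pvPhys_lt _ a ha ha' hL)).length b = pvPhys g.length b := by
    rw [hrl]
  simp only [this]

lemma pvGridInc_shape (g : List (List Int)) (hL : 0 < g.length)
    (hrows : ∀ row ∈ g, row.length = g.length) {a b : Int}
    (ha : -(g.length:Int) ≤ a) (ha' : a < (g.length : Int))
    (hb : -(g.length:Int) ≤ b) (hb' : b < (g.length : Int)) :
    (pvGridInc g a b).length = g.length ∧
    (∀ row ∈ pvGridInc g a b, row.length = g.length) := by
  have hpa := pvPhys_lt g.length a ha ha' hL
  have hrl : g[pvPhys g.length a].length = g.length := hrows _ (List.getElem_mem hpa)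
  have hset : pvGridInc g a b =
      g.set (pvPhys g.length a) (g[pvPhys g.length a].set (pvPhys g.length b) (pvGridGet g a b + 1)) := by
    rw [pvGridInc, pvGetD_in g [] a ha ha' hL, pvSetD_in _ _ _ (by omega) (by omega),
        pvSetD_in _ _ _ (by rw [hrl]; omega) (by rw [hrl]; omega)]
    have : pvPhys g[pvPhys g.length a].length b = pvPhys g.length b := by rw [hrl]
    simp only [this]
  rw [hset]
  refine ⟨by simp, ?_⟩
  intro row hm
  rcases List.mem_or_eq_of_mem_set hm with h | h
  · exact hrows _ h
  · rw [h, List.length_set, hrl]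

lemma pvGridGet_inc (g : List (List Int)) (L : Nat) (hg : g.length = L)
    (hrows : ∀ row ∈ g, row.length = L) {a b a' b' : Int}
    (ha : 0 ≤ a) (ha' : a < (L : Int)) (hb : 0 ≤ b) (hb' : b < (L : Int))
    (hc : 0 ≤ a') (hc' : a' < (L : Int)) (hd : 0 ≤ b') (hd' : b' < (L : Int)) :
    pvGridGet (pvGridInc g a b) a' b' = pvGridGet g a' b' + (if a' = a ∧ b' = b then 1 else 0) := by
  rw [pvGridGet_inc2 g L (by omega) hg hrows (by omega) ha' (by omega) hb'
      (by omega) hc' (by omega) hd']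
  congr 1
  refine if_congr (and_congr ?_ ?_) rfl rfl <;> (unfold pvPhys; split_ifs <;> omega)

lemma pvPaintCells_spec (L : Nat) (r : Int) (cells : List (Int × Int)) :
    ∀ (g : List (List Int)) (f : Int → Int → Int),
    g.length = L → (∀ row ∈ g, row.length = L) →
    (∀ a b : Int, 0 ≤ a → a < (L : Int) → 0 ≤ b → b < (L : Int) → pvGridGet g a b = f a b) →
    cells.Nodup →
    (∀ c ∈ cells, 0 ≤ c.1 ∧ c.1 < (L : Int) ∧ 0 ≤ c.2 ∧ c.2 < (L : Int)) →
    ((pvPaintCells g cells r).2 = if ∃ c ∈ cells, f c.1 c.2 + 1 = 9 then some r else none)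
    ∧ (pvPaintCells g cells r).1.length = L
    ∧ (∀ row ∈ (pvPaintCells g cells r).1, row.length = L)
    ∧ ((pvPaintCells g cells r).2 = none → ∀ a b : Int, 0 ≤ a → a < (L : Int) → 0 ≤ b → b < (L : Int) →
        pvGridGet (pvPaintCells g cells r).1 a b = f a b + (if (a, b) ∈ cells then 1 else 0)) := by
  induction cells with
  | nil =>
    intro g f hg hrows hval _ _
    refine ⟨by simp [pvPaintCells], hg, hrows, ?_⟩
    intro _ a b h1 h2 h3 h4
    simp [pvPaintCells, hval a b h1 h2 h3 h4]
  | cons c rest ih =>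
    intro g f hg hrows hval hnd hin
    obtain ⟨hc1, hc1', hc2, hc2'⟩ := hin c (List.mem_cons_self ..)
    have hg' : (pvGridInc g c.1 c.2).length = L := by
      rw [pvGridInc, PySem.List.length_pySetD, hg]
    have hrows' : ∀ row ∈ pvGridInc g c.1 c.2, row.length = L := by
      intro row hm
      rw [pvGridInc, PySem.List.pySetD_of_nonneg _ _ hc1] at hm
      rcases List.mem_or_eq_of_mem_set hm with h | h
      · exact hrows _ h
      · subst h
        rw [PySem.List.pySetD_of_nonneg _ _ hc2, List.length_set,
            PySem.List.pyGetD_eq_getElem g [] hc1 (by omega)]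
        exact hrows _ (List.getElem_mem (by omega))
    have hval' : ∀ a b : Int, 0 ≤ a → a < (L : Int) → 0 ≤ b → b < (L : Int) →
        pvGridGet (pvGridInc g c.1 c.2) a b = f a b + (if a = c.1 ∧ b = c.2 then 1 else 0) := by
      intro a b h1 h2 h3 h4
      rw [pvGridGet_inc g L hg hrows hc1 hc1' hc2 hc2' h1 h2 h3 h4, hval a b h1 h2 h3 h4]
    have hcheck : pvGridGet (pvGridInc g c.1 c.2) c.1 c.2 = f c.1 c.2 + 1 := by
      rw [hval' c.1 c.2 hc1 hc1' hc2 hc2', if_pos ⟨rfl, rfl⟩]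
    have hf' : ∀ c' ∈ rest, (if c'.1 = c.1 ∧ c'.2 = c.2 then (1:Int) else 0) = 0 := by
      intro c' hm
      have hne : c' ≠ c := fun h => (List.nodup_cons.mp hnd).1 (h ▸ hm)
      rw [if_neg (fun ⟨h1, h2⟩ => hne (Prod.ext h1 h2))]
    by_cases h9 : f c.1 c.2 + 1 = 9
    · refine ⟨?_, ?_, ?_, ?_⟩ <;>
        simp only [pvPaintCells, hcheck, h9, BEq.rfl, if_true]
      · rw [if_pos ⟨c, List.mem_cons_self .., h9⟩]
      · exact hg'
      · exact hrows'
      · intro h; simp at h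
    · have hrec := ih (pvGridInc g c.1 c.2)
        (fun a b => f a b + (if a = c.1 ∧ b = c.2 then 1 else 0)) hg' hrows' hval'
        (List.nodup_cons.mp hnd).2 (fun c' hm => hin c' (List.mem_cons_of_mem _ hm))
      have hsame : pvPaintCells g (c :: rest) r = pvPaintCells (pvGridInc g c.1 c.2) rest r := by
        simp only [pvPaintCells, hcheck]
        rw [if_neg (by simpa using h9)]
      rw [hsame]
      refine ⟨?_, hrec.2.1, hrec.2.2.1, ?_⟩
      · rw [hrec.1]
        refine if_congr ?_ rfl rfl
        constructor
        · rintro ⟨c', hm, hv⟩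
          have hv' : f c'.1 c'.2 + (if c'.1 = c.1 ∧ c'.2 = c.2 then (1:Int) else 0) + 1 = 9 := hv
          rw [hf' c' hm] at hv'
          exact ⟨c', List.mem_cons_of_mem _ hm, by omega⟩
        · rintro ⟨c', hm, hv⟩
          rcases List.mem_cons.mp hm with h | h
          · subst h; exact absurd hv h9
          · refine ⟨c', h, ?_⟩
            show f c'.1 c'.2 + (if c'.1 = c.1 ∧ c'.2 = c.2 then (1:Int) else 0) + 1 = 9
            rw [hf' c' h]
            omega
      · intro hnone a b h1 h2 h3 h4
        rw [hrec.2.2.2 hnone a b h1 h2 h3 h4]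
        by_cases hm : (a, b) = c
        · have hnr : (a, b) ∉ rest := fun h => (List.nodup_cons.mp hnd).1 (hm ▸ h)
          have : a = c.1 ∧ b = c.2 := by cases c; simp_all
          simp [this, hm ▸ hnr]
        · have : ¬(a = c.1 ∧ b = c.2) := fun ⟨u, v⟩ => hm (Prod.ext u v)
          simp [this, List.mem_cons, hm]

lemma pvCnt_append (ms : List (Int × Int)) (p : Int × Int) (a b : Int) :
    pvCnt (ms ++ [p]) a b =
      pvCnt ms a b + (if a - 2 ≤ p.1 ∧ p.1 ≤ a ∧ b - 2 ≤ p.2 ∧ p.2 ≤ b then 1 else 0) := by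
  simp [pvCnt, List.countP_append, List.countP_cons]

-- A's grid loop equals the list-level recursion pvSpecA (coordinates in [0, n+1])
lemma pvLoopA_eq (n : Int) (moves : List (Int × Int)) :
    ∀ (ms : List (Int × Int)) (i : Int) (g : List (List Int)),
    (∀ c ∈ moves, 0 ≤ c.1 ∧ c.1 ≤ n + 1 ∧ 0 ≤ c.2 ∧ c.2 ≤ n + 1) →
    g.length = (n + 4).toNat → (∀ row ∈ g, row.length = (n + 4).toNat) →
    (∀ a b : Int, 0 ≤ a → a < ((n + 4).toNat : Int) → 0 ≤ b → b < ((n + 4).toNat : Int) →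
      pvGridGet g a b = pvCnt ms a b) →
    pvLoopA g moves i = pvSpecA ms moves i := by
  induction moves with
  | nil => intro ms i g _ _ _ _; rfl
  | cons c rest ih =>
    intro ms i g hmv hg hrows hval
    obtain ⟨hx0, hx1, hy0, hy1⟩ := hmv c (List.mem_cons_self ..)
    have hL : (((n + 4).toNat : Int)) = n + 4 := by omega
    have hinrange : ∀ c' ∈ pvFootprint c.1 c.2,
        0 ≤ c'.1 ∧ c'.1 < ((n + 4).toNat : Int) ∧ 0 ≤ c'.2 ∧ c'.2 < ((n + 4).toNat : Int) := by
      rintro ⟨u, v⟩ hm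
      rw [pvMem_footprint] at hm
      simp only [hL]
      omega
    have hspec := pvPaintCells_spec (n + 4).toNat (i + 1) (pvFootprint c.1 c.2) g (pvCnt ms)
      hg hrows hval (pvNodup_footprint _ _) hinrange
    have hA : pvLoopA g (c :: rest) i =
        (match (pvPaintCells g (pvFootprint c.1 c.2) (i + 1)).2 with
         | some r => r
         | none => pvLoopA (pvPaintCells g (pvFootprint c.1 c.2) (i + 1)).1 rest (i + 1)) := rfl
    have hS : pvSpecA ms (c :: rest) i =
        (if (pvFootprint c.1 c.2).any (fun q => pvCnt ms q.1 q.2 + 1 == 9) then i + 1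
         else pvSpecA (ms ++ [c]) rest (i + 1)) := rfl
    have hcond : ((pvFootprint c.1 c.2).any (fun q => pvCnt ms q.1 q.2 + 1 == 9) = true)
        ↔ ∃ c' ∈ pvFootprint c.1 c.2, pvCnt ms c'.1 c'.2 + 1 = 9 := by
      simp [List.any_eq_true]
    by_cases hC : ∃ c' ∈ pvFootprint c.1 c.2, pvCnt ms c'.1 c'.2 + 1 = 9
    · rw [hA, hS, if_pos (hcond.mpr hC), hspec.1, if_pos hC]
    · have hnone : (pvPaintCells g (pvFootprint c.1 c.2) (i + 1)).2 = none := by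
        rw [hspec.1, if_neg hC]
      rw [hA, hS, if_neg (fun h => hC (hcond.mp h)), hnone]
      apply ih (ms ++ [c]) (i + 1) _ (fun c' hm => hmv c' (List.mem_cons_of_mem _ hm))
        hspec.2.1 hspec.2.2.1
      intro a b h1 h2 h3 h4
      rw [hspec.2.2.2 hnone a b h1 h2 h3 h4, pvCnt_append]
      congr 1
      by_cases hm : (a, b) ∈ pvFootprint c.1 c.2
      · rw [if_pos hm, if_pos ((pvMem_footprint _ _ _ _).mp hm)]
      · rw [if_neg hm, if_neg (fun h => hm ((pvMem_footprint _ _ _ _).mpr h))]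

lemma pvMem_corners (w p : Int × Int) : w ∈ pvFootprint (p.1 - 2) (p.2 - 2) ↔ pvInWin w p = true := by
  obtain ⟨w1, w2⟩ := w; obtain ⟨p1, p2⟩ := p
  rw [pvMem_footprint]
  simp [pvInWin]

lemma pvMem_cells (w q : Int × Int) : q ∈ pvFootprint w.1 w.2 ↔ pvInWin w q = true := by
  obtain ⟨w1, w2⟩ := w; obtain ⟨q1, q2⟩ := q
  rw [pvMem_footprint]
  simp [pvInWin]
  omega

lemma pvNodup_cells (w : Int × Int) : (pvFootprint w.1 w.2).Nodup :=
  pvNodup_footprint w.1 w.2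

lemma pvLen_cells (w : Int × Int) : (pvFootprint w.1 w.2).length = 9 := by
  rw [pvFootprint_eq]
  rfl

lemma pvCountP_win (P : List (Int × Int)) (w : Int × Int) :
    P.countP (pvFootprint w.1 w.2).contains = P.countP (fun q => pvInWin w q) := by
  apply List.countP_congr
  intro q _
  simp [pvMem_cells]

-- B's per-move condition, as written in the port, equals pvStepB
set_option maxHeartbeats 1600000 in
lemma pvLoopB_cond (painted : PySem.Set (Int × Int)) (ms : List (Int × Int)) (c : Int × Int)
    (hmem : ∀ p : Int × Int, p ∈ painted ↔ p ∈ ms) :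
    ((PySem.List.pyRange (c.1 - 2) (c.1 + 1)).any (fun cx =>
        (PySem.List.pyRange (c.2 - 2) (c.2 + 1)).any (fun cy =>
          (PySem.List.pyRange 0 3).all (fun dx =>
            (PySem.List.pyRange 0 3).all (fun dy =>
              PySem.Set.contains (PySem.Set.add painted c) (cx + dx, cy + dy))))))
      = pvStepB ms c := by
  have hmem' : ∀ p : Int × Int, p ∈ PySem.Set.add painted c ↔ p ∈ ms ++ [c] := by
    intro p
    rw [PySem.Set.mem_add]
    simp [hmem p]
  rw [Bool.eq_iff_iff]
  unfold pvStepB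
  simp only [List.any_eq_true, List.all_eq_true, decide_eq_true_eq, PySem.Set.contains_iff,
    PySem.List.mem_pyRange_one, hmem']
  constructor
  · rintro ⟨cx, hcx, cy, hcy, hall⟩
    refine ⟨(cx, cy), (pvMem_corners _ _).mpr (by simp [pvInWin]; omega), ?_⟩
    intro q hq
    have hqw := (pvMem_cells _ _).mp hq
    simp [pvInWin] at hqw
    obtain ⟨q1, q2⟩ := q
    have h := hall (q1 - cx) (by simp at hqw ⊢; omega) (q2 - cy) (by simp at hqw ⊢; omega)
    simpa [show cx + (q1 - cx) = q1 by ring, show cy + (q2 - cy) = q2 by ring] using h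
  · rintro ⟨w, hwc, hall⟩
    have hwin := (pvMem_corners _ _).mp hwc
    simp [pvInWin] at hwin
    refine ⟨w.1, by omega, w.2, by omega, ?_⟩
    intro dx hdx dy hdy
    exact hall (w.1 + dx, w.2 + dy) ((pvMem_cells _ _).mpr (by simp [pvInWin]; omega))

-- B's set loop equals the list-level recursion pvSpecB
lemma pvLoopB_eq (moves : List (Int × Int)) :
    ∀ (ms : List (Int × Int)) (painted : PySem.Set (Int × Int)) (i : Int),
    (∀ p : Int × Int, p ∈ painted ↔ p ∈ ms) →
    pvLoopB painted moves (i + 1) = pvSpecB ms moves i := by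
  induction moves with
  | nil => intro ms painted i _; rfl
  | cons c rest ih =>
    intro ms painted i hmem
    show (if ((PySem.List.pyRange (c.1 - 2) (c.1 + 1)).any (fun cx =>
        (PySem.List.pyRange (c.2 - 2) (c.2 + 1)).any (fun cy =>
          (PySem.List.pyRange 0 3).all (fun dx =>
            (PySem.List.pyRange 0 3).all (fun dy =>
              PySem.Set.contains (PySem.Set.add painted c) (cx + dx, cy + dy))))))
      then i + 1 else pvLoopB (PySem.Set.add painted c) rest (i + 1 + 1))
      = (if pvStepB ms c then i + 1 else pvSpecB (ms ++ [c]) rest (i + 1))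
    rw [pvLoopB_cond painted ms c hmem]
    have hmem' : ∀ p : Int × Int, p ∈ PySem.Set.add painted c ↔ p ∈ ms ++ [c] := by
      intro p
      rw [PySem.Set.mem_add]
      simp [hmem p]
    by_cases hc : pvStepB ms c = true
    · rw [if_pos hc, if_pos hc]
    · rw [if_neg hc, if_neg hc]
      exact ih (ms ++ [c]) (PySem.Set.add painted c) (i + 1) hmem' 

lemma pvAtrig_iff (P : List (Int × Int)) :
    pvAtrig P = true ↔ ∃ w : Int × Int, 9 ≤ P.countP (fun q => pvInWin w q) := by
  unfold pvAtrig
  simp only [List.any_eq_true, decide_eq_true_eq]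
  constructor
  · rintro ⟨p, _, w, _, h⟩
    exact ⟨w, by rw [← pvCountP_win]; exact h⟩
  · rintro ⟨w, h⟩
    have hpos : 0 < P.countP (fun q => pvInWin w q) := by omega
    obtain ⟨p, hp, hin⟩ := List.countP_pos_iff.mp hpos
    exact ⟨p, hp, w, (pvMem_corners w p).mpr hin, by rw [pvCountP_win]; exact h⟩

lemma pvBtrig_iff (P : List (Int × Int)) :
    pvBtrig P = true ↔ ∃ w : Int × Int, ∀ q ∈ pvFootprint w.1 w.2, q ∈ P := by
  unfold pvBtrig
  simp only [List.any_eq_true, List.all_eq_true, List.contains_iff_mem]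
  constructor
  · rintro ⟨p, _, w, _, h⟩; exact ⟨w, h⟩
  · rintro ⟨w, h⟩
    refine ⟨(w.1, w.2), h (w.1, w.2) ?_, w, ?_, h⟩
    · rw [pvMem_cells]; simp [pvInWin]
    · rw [pvMem_corners]; simp [pvInWin]

lemma pvBtrig_mono (P Q : List (Int × Int)) (h : pvBtrig P = true) :
    pvBtrig (P ++ Q) = true := by
  rw [pvBtrig_iff] at h ⊢
  obtain ⟨w, hw⟩ := h
  exact ⟨w, fun q hq => List.mem_append_left _ (hw q hq)⟩

lemma pvBtoA (P : List (Int × Int)) (h : pvBtrig P = true) : pvAtrig P = true := by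
  rw [pvBtrig_iff] at h
  rw [pvAtrig_iff]
  obtain ⟨w, hw⟩ := h
  refine ⟨w, ?_⟩
  have hsub : pvFootprint w.1 w.2 ⊆ P.filter (fun q => pvInWin w q) := by
    intro q hq
    rw [List.mem_filter]
    exact ⟨hw q hq, (pvMem_cells w q).mp hq⟩
  have hlen : (pvFootprint w.1 w.2).length ≤ (P.filter (fun q => pvInWin w q)).length := by
    calc (pvFootprint w.1 w.2).length = (pvFootprint w.1 w.2).toFinset.card :=
          (List.toFinset_card_of_nodup (pvNodup_cells w)).symm
      _ ≤ (P.filter (fun q => pvInWin w q)).toFinset.card :=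
          Finset.card_le_card (fun x hx => List.mem_toFinset.mpr (hsub (List.mem_toFinset.mp hx)))
      _ ≤ (P.filter (fun q => pvInWin w q)).length := List.toFinset_card_le _
  rw [List.countP_eq_length_filter]
  rw [pvLen_cells] at hlen
  omega

lemma pvCnt_eq_countP (ms : List (Int × Int)) (a b : Int) :
    pvCnt ms a b = (ms.countP (fun q => pvInWin (a - 2, b - 2) q) : Int) := by
  unfold pvCnt
  congr 1
  apply List.countP_congr
  intro p _
  simp [pvInWin]

-- under "no square yet at nine", A's per-move test fires exactly when pvAtrig turns true
lemma pvStepA_iff (ms : List (Int × Int)) (c : Int × Int) (h : pvAtrig ms = false) :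
    (∃ q ∈ pvFootprint c.1 c.2, pvCnt ms q.1 q.2 + 1 = 9) ↔ pvAtrig (ms ++ [c]) = true := by
  have hbound : ∀ w : Int × Int, ms.countP (fun q => pvInWin w q) ≤ 8 := by
    intro w
    by_contra hgt
    rw [← Bool.not_eq_true, pvAtrig_iff] at h
    exact h ⟨w, by omega⟩
  constructor
  · rintro ⟨⟨a, b⟩, hq, hv⟩
    rw [pvAtrig_iff]
    refine ⟨(a - 2, b - 2), ?_⟩
    rw [pvMem_footprint] at hq
    have hv' : pvCnt ms a b + 1 = 9 := hv
    have hc : pvInWin (a - 2, b - 2) c = true := by simp [pvInWin]; omega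
    have hcast := pvCnt_eq_countP ms a b
    simp only [List.countP_append, List.countP_cons, List.countP_nil, hc, if_true]
    omega
  · intro hA
    rw [pvAtrig_iff] at hA
    obtain ⟨w, hw⟩ := hA
    obtain ⟨w1, w2⟩ := w
    simp only [List.countP_append, List.countP_cons, List.countP_nil] at hw
    have h1 := hbound (w1, w2)
    have hc : pvInWin (w1, w2) c = true := by
      cases hcc : pvInWin (w1, w2) c
      · simp [hcc] at hw; omega
      · rfl
    have h8 : ms.countP (fun q => pvInWin (w1, w2) q) = 8 := by
      simp [hc] at hw
      omega
    refine ⟨(w1 + 2, w2 + 2), ?_, ?_⟩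
    · rw [pvMem_footprint]
      simp [pvInWin] at hc
      omega
    · rw [pvCnt_eq_countP]
      simp only [add_sub_cancel_right]
      omega

-- under "no square yet complete", B's per-move test fires exactly when pvBtrig turns true
lemma pvStepB_iff (ms : List (Int × Int)) (c : Int × Int) (h : pvBtrig ms = false) :
    pvStepB ms c = true ↔ pvBtrig (ms ++ [c]) = true := by
  unfold pvStepB
  simp only [List.any_eq_true, List.all_eq_true, decide_eq_true_eq]
  constructor
  · rintro ⟨w, _, hw⟩
    rw [pvBtrig_iff]
    exact ⟨w, hw⟩
  · intro hB
    rw [pvBtrig_iff] at hB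
    obtain ⟨w, hw⟩ := hB
    by_cases hc : pvInWin w c = true
    · exact ⟨w, (pvMem_corners w c).mpr hc, hw⟩
    · exfalso
      rw [← Bool.not_eq_true, pvBtrig_iff] at h
      refine h ⟨w, fun q hq => ?_⟩
      have := hw q hq
      rcases List.mem_append.mp this with h1 | h1
      · exact h1
      · exfalso
        simp at h1
        subst h1
        exact hc ((pvMem_cells w q).mp hq)

lemma pvSpecB_ge (moves : List (Int × Int)) :
    ∀ (ms : List (Int × Int)) (i : Int),
    pvSpecB ms moves i = -1 ∨ i + 1 ≤ pvSpecB ms moves i := by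
  induction moves with
  | nil => intro ms i; left; rfl
  | cons c rest ih =>
    intro ms i
    show (if pvStepB ms c then i + 1 else pvSpecB (ms ++ [c]) rest (i + 1)) = -1 ∨
      i + 1 ≤ (if pvStepB ms c then i + 1 else pvSpecB (ms ++ [c]) rest (i + 1))
    split_ifs with hc
    · right; omega
    · rcases ih (ms ++ [c]) (i + 1) with h | h
      · left; exact h
      · right; omega

-- outside D_: the two recursions agree step by step
lemma pvSpec_eq (moves : List (Int × Int)) :
    ∀ (ms : List (Int × Int)) (i : Int),
    pvAtrig ms = false →
    (∀ k : Nat, pvAtrig (ms ++ moves.take k) = true → pvBtrig (ms ++ moves.take k) = true) →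
    pvSpecA ms moves i = pvSpecB ms moves i := by
  induction moves with
  | nil => intro ms i _ _; rfl
  | cons c rest ih =>
    intro ms i hA H
    have hBms : pvBtrig ms = false := by
      cases hb : pvBtrig ms
      · rfl
      · exact absurd (pvBtoA ms hb) (by simp [hA])
    have hAcond : ((pvFootprint c.1 c.2).any (fun q => pvCnt ms q.1 q.2 + 1 == 9) = true)
        ↔ pvAtrig (ms ++ [c]) = true := by
      rw [← pvStepA_iff ms c hA]
      simp [List.any_eq_true]
    have hBcond := pvStepB_iff ms c hBms
    have H1 := H 1
    simp only [List.take_succ_cons, List.take_zero] at H1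
    show (if (pvFootprint c.1 c.2).any (fun q => pvCnt ms q.1 q.2 + 1 == 9) then i + 1
          else pvSpecA (ms ++ [c]) rest (i + 1))
        = (if pvStepB ms c then i + 1 else pvSpecB (ms ++ [c]) rest (i + 1))
    by_cases hstep : pvAtrig (ms ++ [c]) = true
    · rw [if_pos (hAcond.mpr hstep), if_pos (hBcond.mpr (H1 hstep))]
    · have hstep' : pvAtrig (ms ++ [c]) = false := by
        cases hx : pvAtrig (ms ++ [c])
        · rfl
        · exact absurd hx hstep
      have hBstep : pvStepB ms c = false := by
        cases hx : pvStepB ms c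
        · rfl
        · exact absurd (pvBtoA _ (hBcond.mp hx)) (by simp [hstep'])
      rw [if_neg (by simp [hAcond, hstep']), if_neg (by simp [hBstep])]
      apply ih (ms ++ [c]) (i + 1) hstep'
      intro k hk
      have h2 := H (k + 1)
      rw [List.take_succ_cons, List.append_cons] at h2
      exact h2 hk

-- inside D_: A fires strictly before B, so the results differ
lemma pvSpec_ne (moves : List (Int × Int)) :
    ∀ (ms : List (Int × Int)) (i : Int), 0 ≤ i →
    pvAtrig ms = false → pvBtrig ms = false →
    (∃ k : Nat, pvAtrig (ms ++ moves.take k) = true ∧ pvBtrig (ms ++ moves.take k) = false) →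
    pvSpecA ms moves i ≠ pvSpecB ms moves i := by
  induction moves with
  | nil =>
    rintro ms i hi hA hB ⟨k, hk1, hk2⟩
    simp at hk1
    simp [hk1] at hA
  | cons c rest ih =>
    rintro ms i hi hA hB ⟨k, hk1, hk2⟩
    have hBcond := pvStepB_iff ms c hB
    have hAcond : ((pvFootprint c.1 c.2).any (fun q => pvCnt ms q.1 q.2 + 1 == 9) = true)
        ↔ pvAtrig (ms ++ [c]) = true := by
      rw [← pvStepA_iff ms c hA]
      simp [List.any_eq_true]
    show (if (pvFootprint c.1 c.2).any (fun q => pvCnt ms q.1 q.2 + 1 == 9) then i + 1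
          else pvSpecA (ms ++ [c]) rest (i + 1))
        ≠ (if pvStepB ms c then i + 1 else pvSpecB (ms ++ [c]) rest (i + 1))
    cases k with
    | zero =>
      simp at hk1
      simp [hk1] at hA
    | succ k' =>
      rw [List.take_succ_cons, List.append_cons] at hk1 hk2
      by_cases hstep : pvAtrig (ms ++ [c]) = true
      · have hBstep : pvStepB ms c = false := by
          cases hx : pvStepB ms c
          · rfl
          · have hmono := pvBtrig_mono (ms ++ [c]) (rest.take k') (hBcond.mp hx)
            rw [hmono] at hk2
            cases hk2
        rw [if_pos (hAcond.mpr hstep), if_neg (by simp [hBstep])]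
        rcases pvSpecB_ge rest (ms ++ [c]) (i + 1) with h | h <;> omega
      · have hstep' : pvAtrig (ms ++ [c]) = false := by
          cases hx : pvAtrig (ms ++ [c])
          · rfl
          · exact absurd hx hstep
        have hB' : pvBtrig (ms ++ [c]) = false := by
          cases hx : pvBtrig (ms ++ [c])
          · rfl
          · exact absurd (pvBtoA _ hx) (by simp [hstep'])
        have hBstep : pvStepB ms c = false := by
          cases hx : pvStepB ms c
          · rfl
          · exact absurd (hBcond.mp hx) (by simp [hB'])
        rw [if_neg (by simp [hAcond, hstep']), if_neg (by simp [hBstep])]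
        exact ih (ms ++ [c]) (i + 1) (by omega) hstep' hB' ⟨k', hk1, hk2⟩

lemma pvCells_len (w : Int × Int) (P : List (Int × Int)) (h : ∀ q ∈ pvFootprint w.1 w.2, q ∈ P) :
    9 ≤ P.length := by
  have hsub : pvFootprint w.1 w.2 ⊆ P := fun q hq => h q hq
  have hlen : (pvFootprint w.1 w.2).length ≤ P.length := by
    calc (pvFootprint w.1 w.2).length = (pvFootprint w.1 w.2).toFinset.card :=
          (List.toFinset_card_of_nodup (pvNodup_cells w)).symm
      _ ≤ P.toFinset.card :=
          Finset.card_le_card (fun x hx => List.mem_toFinset.mpr (hsub (List.mem_toFinset.mp hx)))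
      _ ≤ P.length := List.toFinset_card_le _
  rw [pvLen_cells] at hlen
  omega

-- with at most eight paint operations B never fires
lemma pvLoopB_short (moves : List (Int × Int)) :
    ∀ (ms : List (Int × Int)) (painted : PySem.Set (Int × Int)) (i : Int),
    (∀ p : Int × Int, p ∈ painted ↔ p ∈ ms) →
    ms.length + moves.length ≤ 8 →
    pvLoopB painted moves i = -1 := by
  induction moves with
  | nil => intro ms painted i _ _; rfl
  | cons c rest ih =>
    intro ms painted i hmem h8
    show (if ((PySem.List.pyRange (c.1 - 2) (c.1 + 1)).any (fun cx =>
        (PySem.List.pyRange (c.2 - 2) (c.2 + 1)).any (fun cy =>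
          (PySem.List.pyRange 0 3).all (fun dx =>
            (PySem.List.pyRange 0 3).all (fun dy =>
              PySem.Set.contains (PySem.Set.add painted c) (cx + dx, cy + dy))))))
      then i else pvLoopB (PySem.Set.add painted c) rest (i + 1)) = -1
    rw [pvLoopB_cond painted ms c hmem]
    have hfalse : pvStepB ms c = false := by
      cases hx : pvStepB ms c
      · rfl
      · exfalso
        unfold pvStepB at hx
        simp only [List.any_eq_true, List.all_eq_true, decide_eq_true_eq] at hx
        obtain ⟨w, _, hw⟩ := hx
        have h9 := pvCells_len w (ms ++ [c]) hw
        simp at h9 h8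
        omega
    rw [if_neg (by simp [hfalse])]
    have hmem' : ∀ p : Int × Int, p ∈ PySem.Set.add painted c ↔ p ∈ ms ++ [c] := by
      intro p
      rw [PySem.Set.mem_add]
      simp [hmem p]
    exact ih (ms ++ [c]) (PySem.Set.add painted c) (i + 1) hmem' (by simp at h8 ⊢; omega)

-- with at most eight paint operations A never fires (the padded grid never reaches 9 anywhere)
lemma pvPaintCells_short (L : Nat) (hL : 3 ≤ L) (r : Int) (cells : List (Int × Int)) :
    ∀ (g : List (List Int)) (k : Int),
    g.length = L → (∀ row ∈ g, row.length = L) →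
    (∀ a b : Int, -(L:Int) ≤ a → a < (L:Int) → -(L:Int) ≤ b → b < (L:Int) → pvGridGet g a b ≤ k + 1) →
    (∀ c ∈ cells, -(L:Int) ≤ c.1 ∧ c.1 < (L:Int) ∧ -(L:Int) ≤ c.2 ∧ c.2 < (L:Int)) →
    (∀ c ∈ cells, pvGridGet g c.1 c.2 ≤ k) →
    cells.Pairwise (fun c d => pvPhys L c.1 ≠ pvPhys L d.1 ∨ pvPhys L c.2 ≠ pvPhys L d.2) →
    k + 1 ≤ 8 →
    (pvPaintCells g cells r).2 = none ∧ (pvPaintCells g cells r).1.length = L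
    ∧ (∀ row ∈ (pvPaintCells g cells r).1, row.length = L)
    ∧ (∀ a b : Int, -(L:Int) ≤ a → a < (L:Int) → -(L:Int) ≤ b → b < (L:Int) →
        pvGridGet (pvPaintCells g cells r).1 a b ≤ k + 1) := by
  induction cells with
  | nil =>
    intro g k hg hrows hall _ _ _ _
    exact ⟨rfl, hg, hrows, hall⟩
  | cons c rest ih =>
    intro g k hg hrows hall hin hrem hpw h8
    obtain ⟨hc1, hc1', hc2, hc2'⟩ := hin c (List.mem_cons_self ..)
    have hL0 : 0 < L := by omega
    subst hg
    have hval : ∀ a b : Int, -(g.length:Int) ≤ a → a < (g.length:Int) → -(g.length:Int) ≤ b →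
        b < (g.length:Int) → pvGridGet (pvGridInc g c.1 c.2) a b = pvGridGet g a b
          + (if pvPhys g.length a = pvPhys g.length c.1 ∧ pvPhys g.length b = pvPhys g.length c.2
             then 1 else 0) :=
      fun a b h1 h2 h3 h4 =>
        pvGridGet_inc2 g g.length hL0 rfl hrows hc1 hc1' hc2 hc2' h1 h2 h3 h4
    have hcheck : pvGridGet (pvGridInc g c.1 c.2) c.1 c.2 = pvGridGet g c.1 c.2 + 1 := by
      rw [hval c.1 c.2 hc1 hc1' hc2 hc2', if_pos ⟨rfl, rfl⟩]
    have hshape := pvGridInc_shape g hL0 hrows hc1 hc1' hc2 hc2'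
    have hphys : ∀ a b : Int, -(g.length:Int) ≤ a → a < (g.length:Int) → -(g.length:Int) ≤ b →
        b < (g.length:Int) → pvPhys g.length a = pvPhys g.length c.1 →
        pvPhys g.length b = pvPhys g.length c.2 → pvGridGet g a b = pvGridGet g c.1 c.2 := by
      intro a b h1 h2 h3 h4 hpa hpb
      rw [pvGridGet_phys g hL0 hrows h1 h2 h3 h4, pvGridGet_phys g hL0 hrows hc1 hc1' hc2 hc2']
      simp only [hpa, hpb]
    have hstep : pvPaintCells g (c :: rest) r = pvPaintCells (pvGridInc g c.1 c.2) rest r := by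
      simp only [pvPaintCells, hcheck]
      rw [if_neg (by simp only [beq_iff_eq]; have := hrem c (List.mem_cons_self ..); omega)]
    rw [hstep]
    have hall' : ∀ a b : Int, -(g.length:Int) ≤ a → a < (g.length:Int) → -(g.length:Int) ≤ b →
        b < (g.length:Int) → pvGridGet (pvGridInc g c.1 c.2) a b ≤ k + 1 := by
      intro a b h1 h2 h3 h4
      rw [hval a b h1 h2 h3 h4]
      split_ifs with hcond
      · have := hphys a b h1 h2 h3 h4 hcond.1 hcond.2
        have := hrem c (List.mem_cons_self ..)
        omega
      · have := hall a b h1 h2 h3 h4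
        omega
    have hrem' : ∀ d ∈ rest, pvGridGet (pvGridInc g c.1 c.2) d.1 d.2 ≤ k := by
      intro d hd
      obtain ⟨hd1, hd1', hd2, hd2'⟩ := hin d (List.mem_cons_of_mem _ hd)
      rw [hval d.1 d.2 hd1 hd1' hd2 hd2']
      have hne := (List.pairwise_cons.mp hpw).1 d hd
      rw [if_neg (by rintro ⟨e1, e2⟩; rcases hne with h | h; exact h e1.symm; exact h e2.symm)]
      have := hrem d (List.mem_cons_of_mem _ hd)
      omega
    have hrec := ih (pvGridInc g c.1 c.2) k hshape.1
      (by intro row hm; exact hshape.2 row hm) hall'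
      (fun d hd => hin d (List.mem_cons_of_mem _ hd)) hrem'
      (List.pairwise_cons.mp hpw).2 h8
    exact hrec

lemma pvFootprint_pairwise (L : Nat) (hL : 3 ≤ L) (x y : Int)
    (hx : -(L:Int) ≤ x) (hx' : x + 2 < (L:Int)) (hy : -(L:Int) ≤ y) (hy' : y + 2 < (L:Int)) :
    (pvFootprint x y).Pairwise
      (fun c d => pvPhys L c.1 ≠ pvPhys L d.1 ∨ pvPhys L c.2 ≠ pvPhys L d.2) := by
  refine (pvNodup_footprint x y).imp_of_mem ?_
  intro c d hc hd hne
  obtain ⟨cc1, cc2⟩ := c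
  obtain ⟨dd1, dd2⟩ := d
  rw [pvMem_footprint] at hc hd
  by_cases h1 : cc1 = dd1
  · right
    have h2 : cc2 ≠ dd2 := fun h => hne (by rw [h1, h])
    exact pvPhys_ne L hL (by omega) (by omega) (by omega) (by omega) h2 (by omega) (by omega)
  · left
    exact pvPhys_ne L hL (by omega) (by omega) (by omega) (by omega) h1 (by omega) (by omega)

lemma pvLoopA_short (L : Nat) (hL : 3 ≤ L) (moves : List (Int × Int)) :
    ∀ (g : List (List Int)) (i k : Int),
    g.length = L → (∀ row ∈ g, row.length = L) →
    (∀ a b : Int, -(L:Int) ≤ a → a < (L:Int) → -(L:Int) ≤ b → b < (L:Int) → pvGridGet g a b ≤ k) →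
    0 ≤ k → k + moves.length ≤ 8 →
    (∀ c ∈ moves, -(L:Int) ≤ c.1 ∧ c.1 + 2 < (L:Int) ∧ -(L:Int) ≤ c.2 ∧ c.2 + 2 < (L:Int)) →
    pvLoopA g moves i = -1 := by
  induction moves with
  | nil => intro g i k _ _ _ _ _ _; rfl
  | cons c rest ih =>
    intro g i k hg hrows hall hk h8 hmv
    obtain ⟨hx, hx', hy, hy'⟩ := hmv c (List.mem_cons_self ..)
    have hcellin : ∀ c' ∈ pvFootprint c.1 c.2,
        -(L:Int) ≤ c'.1 ∧ c'.1 < (L:Int) ∧ -(L:Int) ≤ c'.2 ∧ c'.2 < (L:Int) := by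
      rintro ⟨u, v⟩ hm
      rw [pvMem_footprint] at hm
      simp only
      omega
    have hspec := pvPaintCells_short L hL (i + 1) (pvFootprint c.1 c.2) g k hg hrows
      (fun a b h1 h2 h3 h4 => by have := hall a b h1 h2 h3 h4; omega)
      hcellin
      (fun c' hm => by
        obtain ⟨h1, h2, h3, h4⟩ := hcellin c' hm
        exact hall c'.1 c'.2 h1 h2 h3 h4)
      (pvFootprint_pairwise L hL c.1 c.2 hx hx' hy hy')
      (by simp at h8; omega)
    have hA : pvLoopA g (c :: rest) i =
        (match (pvPaintCells g (pvFootprint c.1 c.2) (i + 1)).2 with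
         | some r => r
         | none => pvLoopA (pvPaintCells g (pvFootprint c.1 c.2) (i + 1)).1 rest (i + 1)) := rfl
    rw [hA, hspec.1]
    exact ih _ (i + 1) (k + 1) hspec.2.1 hspec.2.2.1 hspec.2.2.2 (by omega)
      (by simp at h8 ⊢; omega) (fun c' hm => hmv c' (List.mem_cons_of_mem _ hm))

-- ===== VERDICT (by name: the statement is the Claim_ definition above) =====
theorem find_min_moves_for_black_square_spec : Claim_unchanged_find_min_moves_for_black_square := by
  intro n m moves _ hpre
  unfold Spec_find_min_moves_for_black_square
  intro hnD
  rw [pvD_iff] at hnD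
  unfold find_min_moves_for_black_square find_min_moves_for_black_square_alt
  have hrows0 : ∀ row ∈ List.replicate (n + 4).toNat (List.replicate (n + 4).toNat (0:Int)),
      row.length = (n + 4).toNat := by
    intro row hrow
    simp [List.eq_of_mem_replicate hrow]
  have hgrid0 : ∀ a b : Int, -(((n + 4).toNat : Int)) ≤ a → a < ((n + 4).toNat : Int) →
      -(((n + 4).toNat : Int)) ≤ b → b < ((n + 4).toNat : Int) → 0 < (n + 4).toNat →
      pvGridGet (List.replicate (n + 4).toNat (List.replicate (n + 4).toNat (0:Int))) a b = 0 := by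
    intro a b ha ha' hb hb' hpos
    rw [pvGridGet_phys _ (by simpa using hpos)
        (by simpa using hrows0)
        (by simpa using ha) (by simpa using ha') (by simpa using hb) (by simpa using hb')]
    simp [List.getElem_replicate]
  rcases hpre with hpre | ⟨hlen, hn, hbnd⟩
  · have hA : pvLoopA (List.replicate (n + 4).toNat (List.replicate (n + 4).toNat 0)) moves 0
        = pvSpecA [] moves 0 := by
      apply pvLoopA_eq n moves [] 0 _ hpre (by simp) hrows0
      intro a b h1 h2 h3 h4
      rw [hgrid0 a b (by omega) h2 (by omega) h4 (by omega)]
      simp [pvCnt]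
    have hB : pvLoopB PySem.Set.empty moves 1 = pvSpecB [] moves 0 := by
      have h := pvLoopB_eq moves [] PySem.Set.empty 0 (by intro p; simp [PySem.Set.empty])
      simpa using h
    rw [hA, hB]
    apply pvSpec_eq moves [] 0 rfl
    intro k hk
    rw [List.nil_append] at hk ⊢
    by_cases hkl : k ≤ moves.length
    · cases hb : pvBtrig (moves.take k)
      · exact absurd ⟨k, List.mem_range.mpr (by omega), hk, hb⟩ hnD
      · rfl
    · rw [List.take_of_length_le (by omega)] at hk ⊢
      have h1 : pvAtrig (moves.take moves.length) = true := by rw [List.take_length]; exact hk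
      cases hb : pvBtrig moves
      · have h2 : pvBtrig (moves.take moves.length) = false := by rw [List.take_length]; exact hb
        exact absurd ⟨moves.length, List.mem_range.mpr (by omega), h1, h2⟩ hnD
      · rfl
  · have hA := pvLoopA_short (n + 4).toNat (by omega) moves
      (List.replicate (n + 4).toNat (List.replicate (n + 4).toNat (0:Int))) 0 0
      (by simp) hrows0
      (fun a b h1 h2 h3 h4 => le_of_eq (hgrid0 a b h1 h2 h3 h4 (by omega)))
      le_rfl (by omega)
      (by
        intro c hm
        obtain ⟨h1, h2, h3, h4⟩ := hbnd c hm
        omega)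
    have hB := pvLoopB_short moves [] PySem.Set.empty 1
      (by intro p; simp [PySem.Set.empty]) (by simpa using hlen)
    rw [hA, hB]
theorem find_min_moves_for_black_square_changed : Claim_changed_find_min_moves_for_black_square := by
  unfold Claim_changed_find_min_moves_for_black_square; decide
theorem find_min_moves_for_black_square_tight : Claim_exact_find_min_moves_for_black_square := by
  intro n m moves _ hpre hD
  rw [pvD_iff] at hD
  obtain ⟨k, hkr, hAk, hBk⟩ := hD
  rcases hpre with hpre | ⟨hlen, hn, hbnd⟩
  · unfold find_min_moves_for_black_square find_min_moves_for_black_square_alt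
    have hrows0 : ∀ row ∈ List.replicate (n + 4).toNat (List.replicate (n + 4).toNat (0:Int)),
        row.length = (n + 4).toNat := by
      intro row hrow
      simp [List.eq_of_mem_replicate hrow]
    have hgrid0 : ∀ a b : Int, 0 ≤ a → a < ((n + 4).toNat : Int) →
        0 ≤ b → b < ((n + 4).toNat : Int) →
        pvGridGet (List.replicate (n + 4).toNat (List.replicate (n + 4).toNat (0:Int))) a b = 0 := by
      intro a b ha ha' hb hb'
      rw [pvGridGet_phys _ (by simp; omega)
          (by simpa using hrows0)
          (by simp; omega) (by simpa using ha') (by simp; omega) (by simpa using hb')]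
      simp [List.getElem_replicate]
    have hA : pvLoopA (List.replicate (n + 4).toNat (List.replicate (n + 4).toNat 0)) moves 0
        = pvSpecA [] moves 0 := by
      apply pvLoopA_eq n moves [] 0 _ hpre (by simp) hrows0
      intro a b h1 h2 h3 h4
      rw [hgrid0 a b h1 h2 h3 h4]
      simp [pvCnt]
    have hB : pvLoopB PySem.Set.empty moves 1 = pvSpecB [] moves 0 := by
      have h := pvLoopB_eq moves [] PySem.Set.empty 0 (by intro p; simp [PySem.Set.empty])
      simpa using h
    rw [hA, hB]
    exact pvSpec_ne moves [] 0 le_rfl rfl rfl ⟨k, by simpa using hAk, by simpa using hBk⟩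
  · exfalso
    rw [pvAtrig_iff] at hAk
    obtain ⟨w, hw⟩ := hAk
    have h2 := List.countP_le_length (p := fun q => pvInWin w q) (l := moves.take k)
    have h3 : (moves.take k).length ≤ moves.length := by
      simp [List.length_take]
    omega
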